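-- pv_equiv track=rewrite | github.com/GitMonsters/octotetrahedral-agi | arc-puzzle-catalog/re-arc/solves/491a0ca4/solver.py | find_largest_solid_rectangle
-- ===== SOURCE A (Python) =====
-- def find_largest_solid_rectangle(grid, color):
--     n_rows = len(grid)
--     n_cols = len(grid[0]) if n_rows > 0 else 0
--     best_area = 0
--     best_rect = None
--     for r1 in range(n_rows):
--         for c1 in range(n_cols):
--             if grid[r1][c1] != color:
--                 continue
--             for r2 in range(r1, n_rows):
--                 for c2 in range(c1, n_cols):
--                     is_solid = True
--                     for r in range(r1, r2 + 1):
--                         for c in range(c1, c2 + 1):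
--                             if grid[r][c] != color:
--                                 is_solid = False
--                                 break
--                         if not is_solid:
--                             break
--                     if is_solid:
--                         area = (r2 - r1 + 1) * (c2 - c1 + 1)
--                         if area > best_area:
--                             best_area = area
--                             best_rect = (r1, c1, r2, c2)
--     return best_rect
-- ===== SOURCE B (Python) =====
-- def find_largest_solid_rectangle(grid, color):
--     n = len(grid)
--     m = len(grid[0]) if n > 0 else 0
--     # 2D prefix sums of mismatch counts: P[i][j] = # cells (r,c) with r<i, c<j, grid[r][c] != color
--     P = [[0] * (m + 1) for _ in range(n + 1)]
--     for i in range(n):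
--         row = grid[i]
--         Pi = P[i]
--         Pi1 = P[i + 1]
--         for j in range(m):
--             Pi1[j + 1] = Pi[j + 1] + Pi1[j] - Pi[j] + (1 if row[j] != color else 0)
--     best_area = 0
--     best_rect = None
--     for r1 in range(n):
--         for c1 in range(m):
--             if grid[r1][c1] != color:
--                 continue
--             for r2 in range(r1, n):
--                 for c2 in range(c1, m):
--                     if P[r2 + 1][c2 + 1] - P[r1][c2 + 1] - P[r2 + 1][c1] + P[r1][c1] == 0:
--                         area = (r2 - r1 + 1) * (c2 - c1 + 1)
--                         if area > best_area:
--                             best_area = area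
--                             best_rect = (r1, c1, r2, c2)
--     return best_rect
-- ===== Notes on version B (the rewrite author's own statement) =====
-- stated objective: alternative
-- what changed: Replaces A's per-rectangle cell-by-cell solidity scan with a precomputed 2D prefix-sum table of non-color cells giving an O(1) solidity check per candidate rectangle, keeping the same candidate iteration order and tie-breaking.
import Mathlib
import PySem

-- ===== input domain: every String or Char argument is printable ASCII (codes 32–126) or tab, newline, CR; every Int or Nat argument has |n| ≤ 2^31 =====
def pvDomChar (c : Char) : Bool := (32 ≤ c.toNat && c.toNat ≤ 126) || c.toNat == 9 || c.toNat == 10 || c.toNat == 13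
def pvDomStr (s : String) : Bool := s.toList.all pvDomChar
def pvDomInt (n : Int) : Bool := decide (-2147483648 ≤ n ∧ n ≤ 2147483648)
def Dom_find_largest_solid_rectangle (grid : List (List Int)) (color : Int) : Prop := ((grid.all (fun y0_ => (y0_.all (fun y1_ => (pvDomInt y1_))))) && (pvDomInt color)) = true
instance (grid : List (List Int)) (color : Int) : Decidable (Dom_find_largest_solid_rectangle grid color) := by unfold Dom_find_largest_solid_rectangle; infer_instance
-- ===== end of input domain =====

-- B replaces A's per-rectangle cell-by-cell solidity scan by a precomputed 2D prefix-sum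
-- table of non-color cells, same candidate order and tie-breaking (alternative algorithm).

-- ===== PORT A =====

-- grid[r][c]; in-range on every access A performs inside Pre_ (default never read there)
def pvCell (grid : List (List Int)) (r c : Nat) : Int := (grid.getD r []).getD c 0

-- A's inner double loop computing is_solid (early break = List.all)
def pvSolid (grid : List (List Int)) (color : Int) (r1 c1 r2 c2 : Nat) : Bool :=
  (List.range' r1 (r2 + 1 - r1)).all fun r =>
    (List.range' c1 (c2 + 1 - c1)).all fun c => pvCell grid r c == color

def find_largest_solid_rectangle (grid : List (List Int)) (color : Int) : Option (List Int) :=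
  ((List.range grid.length).foldl
    (fun st r1 =>
      (List.range (if 0 < grid.length then (grid.headD []).length else 0)).foldl
        (fun st c1 =>
          if pvCell grid r1 c1 ≠ color then st
          else
            (List.range' r1 (grid.length - r1)).foldl
              (fun st r2 =>
                (List.range' c1 ((if 0 < grid.length then (grid.headD []).length else 0) - c1)).foldl
                  (fun st c2 =>
                    if pvSolid grid color r1 c1 r2 c2 then
                      if st.1 < (r2 - r1 + 1) * (c2 - c1 + 1) then
                        ((r2 - r1 + 1) * (c2 - c1 + 1),
                          some [(r1 : Int), (c1 : Int), (r2 : Int), (c2 : Int)])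
                      else st
                    else st)
                  st)
              st)
        st)
    ((0 : Nat), (none : Option (List Int)))).2

-- ===== PORT B =====

-- row i+1 of the prefix table from row i: new[0]=0, new[j+1]=prev[j+1]+new[j]-prev[j]+mismatch(j)
def pvBuildRow (prev row : List Int) (color : Int) (m : Nat) : List Int :=
  ((List.range m).foldl (fun acc j =>
      (prev.getD (j + 1) 0 + acc.headD 0 - prev.getD j 0 +
        (if row.getD j 0 ≠ color then 1 else 0)) :: acc) [0]).reverse

-- the full prefix table P (n+1 rows of m+1 entries)
def pvMkP (grid : List (List Int)) (color : Int) (m : Nat) : List (List Int) :=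
  grid.foldl (fun P row => P ++ [pvBuildRow (P.getLastD []) row color m])
    [List.replicate (m + 1) (0 : Int)]

-- O(1) solidity test: number of non-color cells in [r1..r2]×[c1..c2] is zero
def pvRectZero (P : List (List Int)) (r1 c1 r2 c2 : Nat) : Bool :=
  (P.getD (r2 + 1) []).getD (c2 + 1) 0 - (P.getD r1 []).getD (c2 + 1) 0
    - (P.getD (r2 + 1) []).getD c1 0 + (P.getD r1 []).getD c1 0 == 0

-- B's main scan, over a prefix table P computed once
def pvScan (grid : List (List Int)) (color : Int) (P : List (List Int)) (n m : Nat) : Option (List Int) :=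
  ((List.range n).foldl
    (fun st r1 =>
      (List.range m).foldl
        (fun st c1 =>
          if pvCell grid r1 c1 ≠ color then st
          else
            (List.range' r1 (n - r1)).foldl
              (fun st r2 =>
                (List.range' c1 (m - c1)).foldl
                  (fun st c2 =>
                    if pvRectZero P r1 c1 r2 c2 then
                      if st.1 < (r2 - r1 + 1) * (c2 - c1 + 1) then
                        ((r2 - r1 + 1) * (c2 - c1 + 1),
                          some [(r1 : Int), (c1 : Int), (r2 : Int), (c2 : Int)])
                      else st
                    else st)
                  st)
              st)
        st)
    ((0 : Nat), (none : Option (List Int)))).2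

def find_largest_solid_rectangle_alt (grid : List (List Int)) (color : Int) : Option (List Int) :=
  pvScan grid color
    (pvMkP grid color (if 0 < grid.length then (grid.headD []).length else 0))
    grid.length (if 0 < grid.length then (grid.headD []).length else 0)

-- ===== PRECONDITION & SPEC =====
-- Pre_ excludes ragged grids with a row shorter than row 0: A always raises IndexError there
-- (it reads grid[r1][c1] for every row r1 and every c1 < len(grid[0])).
def Pre_find_largest_solid_rectangle (grid : List (List Int)) (_color : Int) : Prop :=
  ∀ row ∈ grid, (grid.headD []).length ≤ row.length
instance (grid : List (List Int)) (color : Int) : Decidable (Pre_find_largest_solid_rectangle grid color) := by unfold Pre_find_largest_solid_rectangle; infer_instance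

def pvWitness_find_largest_solid_rectangle : List (List Int) × Int := ([[1, 2], [1, 1]], 1)

def Spec_find_largest_solid_rectangle (grid : List (List Int)) (color : Int) (out : Option (List Int)) : Prop := out = find_largest_solid_rectangle_alt grid color
instance (grid : List (List Int)) (color : Int) (out : Option (List Int)) : Decidable (Spec_find_largest_solid_rectangle grid color out) := by unfold Spec_find_largest_solid_rectangle; infer_instance

-- ===== CLAIM (what is proved, stated in full; the proofs are below) =====
def Claim_equal_find_largest_solid_rectangle : Prop := ∀ (grid : List (List Int)) (color : Int), Dom_find_largest_solid_rectangle grid color → Pre_find_largest_solid_rectangle grid color → Spec_find_largest_solid_rectangle grid color (find_largest_solid_rectangle grid color)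

-- ===== LEMMAS AND PROOFS =====

-- the recurrence pvBuildRow's fold computes
def pvNew (prev row : List Int) (color : Int) : Nat → Int
  | 0 => 0
  | j + 1 => prev.getD (j + 1) 0 + pvNew prev row color j - prev.getD j 0 +
      (if row.getD j 0 ≠ color then 1 else 0)

-- the rows pvMkP appends after a last row `last`
def pvChain (last : List Int) (rows : List (List Int)) (color : Int) (m : Nat) : List (List Int) :=
  match rows with
  | [] => []
  | row :: rest => pvBuildRow last row color m :: pvChain (pvBuildRow last row color m) rest color m

-- mathematical prefix sum: number of non-color cells (r,c) with r<i, c<j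
def pvS (grid : List (List Int)) (color : Int) (i j : Nat) : Int :=
  ∑ r ∈ Finset.range i, ∑ c ∈ Finset.range j, (if pvCell grid r c ≠ color then (1 : Int) else 0)

lemma pvBuildRow_foldl (prev row : List Int) (color : Int) (k : Nat) :
    (List.range k).foldl (fun acc j =>
      (prev.getD (j + 1) 0 + acc.headD 0 - prev.getD j 0 +
        (if row.getD j 0 ≠ color then 1 else 0)) :: acc) [0]
      = ((List.range (k + 1)).map (pvNew prev row color)).reverse := by
  induction k with
  | zero => simp [pvNew]
  | succ k ih =>
      have hhead : (((List.range (k + 1)).map (pvNew prev row color)).reverse).headD 0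
          = pvNew prev row color k := by
        rw [List.range_succ]; simp
      have hr2 : List.range (k + 1 + 1) = List.range (k + 1) ++ [k + 1] := List.range_succ
      rw [List.range_succ, List.foldl_append, ih, List.foldl_cons, List.foldl_nil, hhead,
        hr2, List.map_append, List.reverse_append]
      simp [pvNew]

lemma pvBuildRow_getD (prev row : List Int) (color : Int) (m j : Nat) (hj : j ≤ m) :
    (pvBuildRow prev row color m).getD j 0 = pvNew prev row color j := by
  unfold pvBuildRow
  rw [pvBuildRow_foldl, List.reverse_reverse]
  rw [List.getD_eq_getElem?_getD]
  simp [Nat.lt_succ_of_le hj]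

lemma pvNew_eq (prev row : List Int) (color : Int) (j : Nat) :
    pvNew prev row color j = prev.getD j 0 - prev.getD 0 0 +
      ∑ c ∈ Finset.range j, (if row.getD c 0 ≠ color then (1 : Int) else 0) := by
  induction j with
  | zero => simp [pvNew]
  | succ j ih => rw [pvNew, ih, Finset.sum_range_succ]; ring

lemma pvFoldl_chain (color : Int) (m : Nat) :
    ∀ (rows : List (List Int)) (P0 : List (List Int)) (l : List Int),
      rows.foldl (fun P row => P ++ [pvBuildRow (P.getLastD []) row color m]) (P0 ++ [l])
        = (P0 ++ [l]) ++ pvChain l rows color m := by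
  intro rows
  induction rows with
  | nil => intro P0 l; simp [pvChain]
  | cons row rest ih =>
      intro P0 l
      rw [List.foldl_cons]
      have h1 : (P0 ++ [l]).getLastD [] = l := by simp
      rw [h1]
      have h2 := ih (P0 ++ [l]) (pvBuildRow l row color m)
      simp only [List.append_assoc] at h2 ⊢
      rw [h2]
      simp [pvChain]

lemma pvMkP_eq_chain (grid : List (List Int)) (color : Int) (m : Nat) :
    pvMkP grid color m
      = List.replicate (m + 1) (0 : Int) :: pvChain (List.replicate (m + 1) 0) grid color m := by
  unfold pvMkP
  have := pvFoldl_chain color m grid [] (List.replicate (m + 1) (0 : Int))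
  simpa using this

lemma pvChain_getD (color : Int) (m : Nat) :
    ∀ (rows : List (List Int)) (last : List Int), last.getD 0 0 = 0 →
      ∀ k, k < rows.length → ∀ j, j ≤ m →
        ((pvChain last rows color m).getD k []).getD j 0
          = last.getD j 0 + ∑ r ∈ Finset.range (k + 1), ∑ c ∈ Finset.range j,
              (if (rows.getD r []).getD c 0 ≠ color then (1 : Int) else 0) := by
  intro rows
  induction rows with
  | nil => intro last _ k hk; simp at hk
  | cons row rest ih =>
      intro last hlast k hk j hj
      cases k with
      | zero =>
          simp only [pvChain, List.getD_cons_zero]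
          rw [pvBuildRow_getD _ _ _ _ _ hj, pvNew_eq, hlast]
          simp
      | succ k =>
          simp only [pvChain, List.getD_cons_succ]
          have hlast' : (pvBuildRow last row color m).getD 0 0 = 0 := by
            rw [pvBuildRow_getD _ _ _ _ 0 (Nat.zero_le m)]; rfl
          have hk' : k < rest.length := by simpa using hk
          rw [ih (pvBuildRow last row color m) hlast' k hk' j hj]
          rw [pvBuildRow_getD _ _ _ _ _ hj, pvNew_eq, hlast]
          rw [Finset.sum_range_succ' (f := fun r => ∑ c ∈ Finset.range j,
              (if ((row :: rest).getD r []).getD c 0 ≠ color then (1 : Int) else 0))]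
          simp only [List.getD_cons_succ, List.getD_cons_zero]
          ring

lemma pvP_val (grid : List (List Int)) (color : Int) (m i j : Nat)
    (hi : i ≤ grid.length) (hj : j ≤ m) :
    ((pvMkP grid color m).getD i []).getD j 0 = pvS grid color i j := by
  rw [pvMkP_eq_chain]
  cases i with
  | zero =>
      simp [pvS, List.getD_eq_getElem?_getD, Nat.lt_succ_of_le hj]
  | succ k =>
      rw [List.getD_cons_succ]
      have hrep : (List.replicate (m + 1) (0 : Int)).getD 0 0 = 0 := by
        simp [List.getD_eq_getElem?_getD]
      rw [pvChain_getD color m grid _ hrep k (by omega) j hj]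
      have hrepj : (List.replicate (m + 1) (0 : Int)).getD j 0 = 0 := by
        simp [List.getD_eq_getElem?_getD, Nat.lt_succ_of_le hj]
      rw [hrepj]
      simp [pvS, pvCell]

lemma pvRect_sum (grid : List (List Int)) (color : Int) (r1 c1 r2 c2 : Nat)
    (hr : r1 ≤ r2) (hc : c1 ≤ c2) :
    pvS grid color (r2 + 1) (c2 + 1) - pvS grid color r1 (c2 + 1)
      - pvS grid color (r2 + 1) c1 + pvS grid color r1 c1
      = ∑ r ∈ Finset.Ico r1 (r2 + 1), ∑ c ∈ Finset.Ico c1 (c2 + 1),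
          (if pvCell grid r c ≠ color then (1 : Int) else 0) := by
  have hr' : r1 ≤ r2 + 1 := by omega
  have hc' : c1 ≤ c2 + 1 := by omega
  have hrow : ∀ J, pvS grid color (r2 + 1) J - pvS grid color r1 J
      = ∑ r ∈ Finset.Ico r1 (r2 + 1), ∑ c ∈ Finset.range J,
          (if pvCell grid r c ≠ color then (1 : Int) else 0) := by
    intro J
    rw [Finset.sum_Ico_eq_sub _ hr']
    rfl
  have : pvS grid color (r2 + 1) (c2 + 1) - pvS grid color r1 (c2 + 1)
      - pvS grid color (r2 + 1) c1 + pvS grid color r1 c1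
      = (pvS grid color (r2 + 1) (c2 + 1) - pvS grid color r1 (c2 + 1))
        - (pvS grid color (r2 + 1) c1 - pvS grid color r1 c1) := by ring
  rw [this, hrow, hrow, ← Finset.sum_sub_distrib]
  refine Finset.sum_congr rfl fun r _ => ?_
  rw [Finset.sum_Ico_eq_sub _ hc']

lemma pvCond_eq (grid : List (List Int)) (color : Int) (m r1 c1 r2 c2 : Nat)
    (hr : r1 ≤ r2) (hc : c1 ≤ c2) (hr2 : r2 < grid.length) (hc2 : c2 < m) :
    pvRectZero (pvMkP grid color m) r1 c1 r2 c2 = pvSolid grid color r1 c1 r2 c2 := by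
  have key : (pvRectZero (pvMkP grid color m) r1 c1 r2 c2 = true)
      ↔ (pvSolid grid color r1 c1 r2 c2 = true) := by
    unfold pvRectZero
    rw [pvP_val grid color m (r2+1) (c2+1) (by omega) (by omega),
        pvP_val grid color m r1 (c2+1) (by omega) (by omega),
        pvP_val grid color m (r2+1) c1 (by omega) (by omega),
        pvP_val grid color m r1 c1 (by omega) (by omega)]
    rw [beq_iff_eq, pvRect_sum grid color r1 c1 r2 c2 hr hc]
    rw [Finset.sum_eq_zero_iff_of_nonneg (fun r _ => Finset.sum_nonneg fun c _ => by positivity)]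
    unfold pvSolid
    simp only [List.all_eq_true, List.mem_range'_1, beq_iff_eq]
    constructor
    · intro h r hrr c hcc
      have := (Finset.sum_eq_zero_iff_of_nonneg (fun c _ => by positivity)).1
        (h r (Finset.mem_Ico.2 ⟨hrr.1, by omega⟩)) c (Finset.mem_Ico.2 ⟨hcc.1, by omega⟩)
      by_contra hne
      simp [hne] at this
    · intro h r hrmem
      refine Finset.sum_eq_zero fun c hcmem => ?_
      have h1 := Finset.mem_Ico.1 hrmem
      have h2 := Finset.mem_Ico.1 hcmem
      have := h r ⟨h1.1, by omega⟩ c ⟨h2.1, by omega⟩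
      simp [this]
  exact Bool.coe_iff_coe.1 key

-- ===== VERDICT (by name: the statement is the Claim_ definition above) =====
theorem find_largest_solid_rectangle_spec : Claim_equal_find_largest_solid_rectangle := by
  intro grid color _ _
  unfold Spec_find_largest_solid_rectangle find_largest_solid_rectangle
    find_largest_solid_rectangle_alt pvScan
  refine congrArg Prod.snd ?_
  refine PySem.List.foldl_congr_mem _ _ _ _ fun st r1 hr1 => ?_
  refine PySem.List.foldl_congr_mem _ _ _ _ fun st c1 hc1 => ?_
  split_ifs with h hlen
  · rfl
  · refine PySem.List.foldl_congr_mem _ _ _ _ fun st r2 hr2 => ?_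
    refine PySem.List.foldl_congr_mem _ _ _ _ fun st c2 hc2 => ?_
    have hr1' := List.mem_range.1 hr1
    have hc1' := List.mem_range.1 hc1
    have hr2' := List.mem_range'_1.1 hr2
    have hc2' := List.mem_range'_1.1 hc2
    rw [pvCond_eq grid color _ r1 c1 r2 c2 hr2'.1 hc2'.1 (by omega) (by omega)]
  · exact absurd (List.mem_range.1 hr1) (by omega)
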